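-- pv_equiv track=rewrite | github.com/Jean-Fred64/AlignTester | AlignTester/src/backend/api/greaseweazle.py | _filter_non_critical_errors
-- ===== SOURCE A (Python) =====
-- def _filter_non_critical_errors(output: str) -> str:
--     """
--     Filtre les messages d'erreur non bloquants de la sortie
--     (ex: GitHub API Rate Limit exceeded)
--     """
--     lines = output.split('\n')
--     filtered_lines = []
--     skip_next = False
--
--     for line in lines:
--         # Ignorer les lignes contenant des erreurs non bloquantes
--         if 'FATAL ERROR' in line and 'Rate Limit' in line:
--             skip_next = True
--             continue
--         if skip_next and line.strip() == '':
--             skip_next = False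
--             continue
--         if not skip_next:
--             filtered_lines.append(line)
--
--     return '\n'.join(filtered_lines)
-- ===== SOURCE B (Python) =====
-- def _filter_non_critical_errors(output: str) -> str:
--     """Index-based block consumer: on a rate-limit error line, consume the whole
--     block (every following line up to and including the next blank line) at once,
--     instead of carrying a skip flag across the loop."""
--     lines = output.split('\n')
--     kept = []
--     i = 0
--     n = len(lines)
--     while i < n:
--         line = lines[i]
--         i += 1
--         if 'FATAL ERROR' in line and 'Rate Limit' in line:
--             # consume the rest of the error block: skip up to and including the next blank line
--             while i < n:
--                 cur = lines[i]
--                 i += 1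
--                 if cur.strip() == '':
--                     break
--         else:
--             kept.append(line)
--     return '\n'.join(kept)
-- ===== Notes on version B (the rewrite author's own statement) =====
-- stated objective: alternative
-- what changed: Replaces A's skip_next boolean flag carried across a single for-loop with an index-style outer loop that, on a rate-limit line, consumes the entire error block (all following lines up to and including the next blank line) in an inner loop.
import Mathlib
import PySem

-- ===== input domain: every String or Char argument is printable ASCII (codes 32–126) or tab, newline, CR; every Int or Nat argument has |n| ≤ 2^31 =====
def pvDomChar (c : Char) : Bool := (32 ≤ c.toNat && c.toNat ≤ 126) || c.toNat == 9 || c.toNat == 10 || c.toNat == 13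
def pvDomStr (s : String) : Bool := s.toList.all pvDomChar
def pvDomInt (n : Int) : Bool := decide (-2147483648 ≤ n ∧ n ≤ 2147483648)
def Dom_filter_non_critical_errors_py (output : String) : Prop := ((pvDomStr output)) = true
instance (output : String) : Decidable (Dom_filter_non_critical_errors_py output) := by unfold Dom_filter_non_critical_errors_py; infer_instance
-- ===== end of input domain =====

-- B replaces A's skip_next flag with an index-style loop that consumes a whole error
-- block (up to and including the next blank line) in an inner loop; objective: alternative decomposition.

-- shared helper: the condition 'FATAL ERROR' in line and 'Rate Limit' in line (appears verbatim in both Pythons)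
def pvIsRateLimit (line : String) : Bool :=
  PySem.Str.isIn "FATAL ERROR" line && PySem.Str.isIn "Rate Limit" line

-- ===== PORT A =====
-- the for-loop over lines with the skip_next flag, appending into filtered_lines
def pvAGo : List String → List String → Bool → List String
  | [], acc, _ => acc
  | line :: rest, acc, skipNext =>
    if pvIsRateLimit line then pvAGo rest acc true
    else if skipNext && (PySem.Str.strip line == "") then pvAGo rest acc false
    else if !skipNext then pvAGo rest (acc ++ [line]) skipNext
    else pvAGo rest acc skipNext

def filter_non_critical_errors_py (output : String) : String :=
  -- output.split('\n'): sep is the non-empty literal "\n", so split? is always some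
  PySem.Str.join "\n" (pvAGo ((PySem.Str.split? output "\n").getD []) [] false)

-- ===== PORT B =====
-- B's inner while loop: advance past lines until (and including) one whose strip() is ''
def pvBSkip : List String → List String
  | [] => []
  | cur :: rest => if PySem.Str.strip cur == "" then rest else pvBSkip rest

theorem pvBSkip_length_le (xs : List String) : (pvBSkip xs).length ≤ xs.length := by
  induction xs with
  | nil => simp [pvBSkip]
  | cons c rest ih =>
    simp only [pvBSkip]
    split
    · simp
    · exact Nat.le_succ_of_le ih

-- B's outer while loop over the lines, kept as the accumulator
def pvBGo : List String → List String → List String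
  | [], kept => kept
  | line :: rest, kept =>
    if pvIsRateLimit line then pvBGo (pvBSkip rest) kept
    else pvBGo rest (kept ++ [line])
termination_by xs _ => xs.length
decreasing_by
  · exact Nat.lt_succ_of_le (pvBSkip_length_le rest)
  · simp

def filter_non_critical_errors_py_alt (output : String) : String :=
  PySem.Str.join "\n" (pvBGo ((PySem.Str.split? output "\n").getD []) [])

-- ===== PRECONDITION & SPEC =====
def Spec_filter_non_critical_errors_py (output : String) (out : String) : Prop := out = filter_non_critical_errors_py_alt output
instance (output : String) (out : String) : Decidable (Spec_filter_non_critical_errors_py output out) := by unfold Spec_filter_non_critical_errors_py; infer_instance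

-- ===== CLAIM (what is proved, stated in full; the proofs are below) =====
def Claim_equal_filter_non_critical_errors_py : Prop := ∀ (output : String), Dom_filter_non_critical_errors_py output → Spec_filter_non_critical_errors_py output (filter_non_critical_errors_py output)

-- ===== LEMMAS AND PROOFS =====

-- a rate-limit line contains the non-space character 'F', so its strip() is never ''
theorem pvRateLimit_not_blank (l : String) (h : pvIsRateLimit l = true) :
    (PySem.Str.strip l == "") = false := by
  have hin : PySem.Str.isIn "FATAL ERROR" l = true := by
    cases hh : PySem.Str.isIn "FATAL ERROR" l with
    | true => rfl
    | false => exfalso; unfold pvIsRateLimit at h; rw [hh] at h; simp at h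
  have hinf : ("FATAL ERROR".toList) <:+: l.toList := (PySem.Str.isIn_iff_infix _ _).mp hin
  obtain ⟨s, t, hst⟩ := hinf
  have hF : 'F' ∈ l.toList := by
    rw [← hst]; simp
  by_contra hb
  have hb' : PySem.Str.strip l = "" := by
    cases hbe : (PySem.Str.strip l == "") with
    | true => exact (beq_iff_eq).mp hbe
    | false => exact absurd hbe hb
  have hnil : PySem.Chars.strip l.toList = [] := by
    have := congrArg String.toList hb'
    simpa [PySem.Str.toList_strip] using this
  -- strip = [] forces every character to be whitespace
  have hall : ∀ c ∈ l.toList, PySem.Chars.isspace c = true := by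
    intro c hc
    have h1 : List.dropWhile PySem.Chars.isspace
        (List.reverse (PySem.Chars.lstrip l.toList)) = [] := by
      have : PySem.Chars.rstrip (PySem.Chars.lstrip l.toList) = [] := hnil
      simp only [PySem.Chars.rstrip] at this
      rw [List.reverse_eq_nil_iff] at this; exact this
    have h2 : ∀ x ∈ PySem.Chars.lstrip l.toList, PySem.Chars.isspace x = true := by
      intro x hx
      exact (List.dropWhile_eq_nil_iff).mp h1 x (by simpa using hx)
    have hsplit : List.takeWhile PySem.Chars.isspace l.toList ++
        PySem.Chars.lstrip l.toList = l.toList := by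
      simpa [PySem.Chars.lstrip] using
        (List.takeWhile_append_dropWhile (p := PySem.Chars.isspace) (l := l.toList))
    rcases (by rw [← hsplit] at hc; exact List.mem_append.mp hc) with h | h
    · exact List.mem_takeWhile_imp h
    · exact h2 c h
  have := hall 'F' hF
  simp [PySem.Chars.isspace] at this

-- A in skip mode behaves like B's block consumer followed by A in normal mode
theorem pvA_skip (lines : List String) (acc : List String) :
    pvAGo lines acc true = pvAGo (pvBSkip lines) acc false := by
  induction lines generalizing acc with
  | nil => simp [pvAGo, pvBSkip]
  | cons l rest ih =>
    by_cases hr : pvIsRateLimit l = true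
    · have hb := pvRateLimit_not_blank l hr
      simp [pvAGo, pvBSkip, hr, hb, ih]
    · simp only [pvAGo, pvBSkip, hr, Bool.true_and]
      by_cases hbl : (PySem.Str.strip l == "") = true
      · simp [hbl]
      · simp only [Bool.not_eq_true] at hbl
        simp [hbl, ih]

-- A in normal mode equals B's outer loop
theorem pvA_eq_pvB (lines : List String) (acc : List String) :
    pvAGo lines acc false = pvBGo lines acc := by
  induction hn : lines.length using Nat.strong_induction_on generalizing lines acc with
  | _ n ih =>
    cases lines with
    | nil => simp [pvAGo, pvBGo]
    | cons l rest =>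
      by_cases hr : pvIsRateLimit l = true
      · rw [pvAGo, if_pos hr, pvA_skip, pvBGo, if_pos hr]
        exact ih _ (by simpa [← hn] using Nat.lt_succ_of_le (pvBSkip_length_le rest)) _ _ rfl
      · rw [show pvAGo (l :: rest) acc false = pvAGo rest (acc ++ [l]) false from by
          simp [pvAGo, hr]]
        rw [pvBGo, if_neg hr]
        exact ih _ (by simp [← hn]) _ _ rfl

-- ===== VERDICT (by name: the statement is the Claim_ definition above) =====
theorem filter_non_critical_errors_py_spec : Claim_equal_filter_non_critical_errors_py := by
  intro output _
  unfold Spec_filter_non_critical_errors_py filter_non_critical_errors_py filter_non_critical_errors_py_alt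
  rw [pvA_eq_pvB]
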